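-- pv_equiv track=rewrite | github.com/trdavidson/self-recognition | src/evaluations.py | _get_unique_views
-- ===== SOURCE A (Python) =====
-- from typing import Tuple, Union, List
-- from itertools import product, combinations
--
-- def _get_unique_views(x: List[list]):
--     y = [True, False]
--     u_views = []
--     for i in x:
--         # get true-false combinations
--         a = list(product(i, y))
--         # get length of combinations
--         num = len(i)
--         # get all unique combinations of different keys
--         c = [b for b in list(combinations(a, num)) if len(set([x_[0] for x_ in b])) == num]
--         u_views.append(c)
--     return u_views
-- ===== SOURCE B (Python) =====
-- from itertools import product
--
-- def _get_unique_views(x):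
--     u_views = []
--     for i in x:
--         if len(set(i)) != len(i):
--             u_views.append([])
--         else:
--             u_views.append([tuple(zip(i, bits))
--                             for bits in product((True, False), repeat=len(i))])
--     return u_views
-- ===== Notes on version B (the rewrite author's own statement) =====
-- stated objective: faster
-- what changed: Instead of enumerating all C(2n,n) combinations of (key,bool) pairs and filtering those with n distinct keys, B directly generates the 2^n true/false assignments with product(repeat=len(i)) zipped against the keys, and an empty result immediately when the list has duplicate keys.
import Mathlib
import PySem

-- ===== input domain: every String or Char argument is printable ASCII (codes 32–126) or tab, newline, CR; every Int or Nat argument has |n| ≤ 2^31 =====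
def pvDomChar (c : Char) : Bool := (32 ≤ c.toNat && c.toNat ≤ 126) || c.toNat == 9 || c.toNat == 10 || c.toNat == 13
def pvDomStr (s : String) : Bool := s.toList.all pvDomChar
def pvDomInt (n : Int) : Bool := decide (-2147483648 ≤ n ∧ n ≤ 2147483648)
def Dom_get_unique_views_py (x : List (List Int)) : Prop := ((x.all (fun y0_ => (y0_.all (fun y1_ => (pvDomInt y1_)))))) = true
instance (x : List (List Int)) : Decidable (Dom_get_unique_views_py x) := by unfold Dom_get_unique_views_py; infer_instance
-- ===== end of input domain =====

-- B replaces A's filter over all C(2n, n) combinations by directly generating the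
-- 2^n true/false assignments (empty when the list has duplicate keys); same results.

-- ===== PORT A =====
-- list(product(i, [True, False]))
def pyProductTF (i : List Int) : List (Int × Bool) :=
  i.flatMap (fun k => [(k, true), (k, false)])

-- itertools.combinations(l, n), in itertools' lexicographic index order
def pyCombinations {α : Type} : Nat → List α → List (List α)
  | 0, _ => [[]]
  | _ + 1, [] => []
  | n + 1, h :: t => ((pyCombinations n t).map (fun b => h :: b)) ++ pyCombinations (n + 1) t

def get_unique_views_py (x : List (List Int)) : List (List (List (Int × Bool))) :=
  x.foldl (fun u_views i =>
    let a := pyProductTF i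
    let num := i.length
    let c := (pyCombinations num a).filter
      (fun b => (PySem.Set.ofList (b.map Prod.fst)).length == num)
    u_views ++ [c]) []

-- ===== PORT B =====
-- itertools.product((True, False), repeat=n)
def boolTuples : Nat → List (List Bool)
  | 0 => [[]]
  | n + 1 => [true, false].flatMap (fun bb => (boolTuples n).map (fun bs => bb :: bs))

def get_unique_views_py_alt (x : List (List Int)) : List (List (List (Int × Bool))) :=
  x.map (fun i =>
    if (PySem.Set.ofList i).length != i.length then []
    else (boolTuples i.length).map (fun bits => i.zip bits))

-- ===== PRECONDITION & SPEC =====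
def Spec_get_unique_views_py (x : List (List Int)) (out : List (List (List (Int × Bool)))) : Prop := out = get_unique_views_py_alt x
instance (x : List (List Int)) (out : List (List (List (Int × Bool)))) : Decidable (Spec_get_unique_views_py x out) := by unfold Spec_get_unique_views_py; infer_instance

-- ===== CLAIM (what is proved, stated in full; the proofs are below) =====
def Claim_equal_get_unique_views_py : Prop := ∀ (x : List (List Int)), Dom_get_unique_views_py x → Spec_get_unique_views_py x (get_unique_views_py x)

-- ===== LEMMAS AND PROOFS =====

lemma foldl_add_length_le {α : Type} [BEq α] (ys s : List α) :
    (ys.foldl PySem.Set.add s).length ≤ s.length + ys.length := by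
  induction ys generalizing s with
  | nil => simp
  | cons y t ih =>
    simp only [List.foldl_cons]
    have h := ih (PySem.Set.add s y)
    have : (PySem.Set.add s y).length ≤ s.length + 1 := by
      unfold PySem.Set.add; split <;> simp
    simp only [List.length_cons]
    omega

lemma foldl_add_length_eq {α : Type} [BEq α] [LawfulBEq α] (ys s : List α)
    (h : (ys.foldl PySem.Set.add s).length = s.length + ys.length) :
    ys.Nodup ∧ ∀ y ∈ ys, y ∉ s := by
  induction ys generalizing s with
  | nil => simp
  | cons y t ih =>
    simp only [List.foldl_cons] at h
    by_cases hy : PySem.Set.contains s y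
    · exfalso
      have hadd : PySem.Set.add s y = s := by unfold PySem.Set.add; simp only [hy, if_true]
      rw [hadd] at h
      have := foldl_add_length_le t s
      simp only [List.length_cons] at h
      omega
    · have hys : y ∉ s := by
        unfold PySem.Set.contains at hy
        simp at hy
        exact hy
      have hadd : PySem.Set.add s y = s ++ [y] := by
        unfold PySem.Set.add PySem.Set.contains
        simp [hys]
      rw [hadd] at h
      have h' : (t.foldl PySem.Set.add (s ++ [y])).length = (s ++ [y]).length + t.length := by
        simp at h ⊢; omega
      obtain ⟨hnd, hfr⟩ := ih (s ++ [y]) h'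
      refine ⟨List.nodup_cons.mpr ⟨fun hyt => ?_, hnd⟩, ?_⟩
      · have := hfr y hyt; simp at this
      · intro z hz
        rcases hz with _ | hz
        · exact hys
        · intro hzs; exact (hfr z (by assumption)) (by simp [hzs])

lemma foldl_add_of_nodup {α : Type} [BEq α] [LawfulBEq α] (ys : List α) :
    ∀ s : List α, ys.Nodup → (∀ y ∈ ys, y ∉ s) → ys.foldl PySem.Set.add s = s ++ ys := by
  induction ys with
  | nil => simp
  | cons y t ih =>
    intro s hnd hfr
    have hys : y ∉ s := hfr y (by simp)
    have hadd : PySem.Set.add s y = s ++ [y] := by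
      unfold PySem.Set.add PySem.Set.contains
      simp [hys]
    simp only [List.foldl_cons, hadd]
    rw [ih (s ++ [y]) (List.nodup_cons.mp hnd).2]
    · simp
    · intro z hz
      simp only [List.mem_append, List.mem_singleton]
      rintro (hzs | rfl)
      · exact hfr z (by simp [hz]) hzs
      · exact (List.nodup_cons.mp hnd).1 hz

lemma setLen_eq_iff {α : Type} [BEq α] [LawfulBEq α] (ys : List α) :
    (PySem.Set.ofList ys).length = ys.length ↔ ys.Nodup := by
  constructor
  · intro h
    have := foldl_add_length_eq ys []
    rw [PySem.Set.ofList_eq_foldl] at h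
    exact (this (by simpa using h)).1
  · intro h
    rw [PySem.Set.ofList_eq_foldl, foldl_add_of_nodup ys [] h (by simp)]
    simp

lemma mem_pyCombinations {α : Type} (l : List α) :
    ∀ (n : Nat) (b : List α), b ∈ pyCombinations n l → b.Sublist l ∧ b.length = n := by
  induction l with
  | nil =>
    intro n b hb
    cases n with
    | zero => simp [pyCombinations] at hb; simp [hb]
    | succ m => simp [pyCombinations] at hb
  | cons h t ih =>
    intro n b hb
    cases n with
    | zero => simp [pyCombinations] at hb; simp [hb]
    | succ m =>
      simp only [pyCombinations, List.mem_append, List.mem_map] at hb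
      rcases hb with ⟨b', hb', rfl⟩ | hb
      · obtain ⟨hs, hl⟩ := ih m b' hb'
        exact ⟨List.Sublist.cons₂ h hs, by simp [hl]⟩
      · obtain ⟨hs, hl⟩ := ih (m + 1) b hb
        exact ⟨hs.cons h, hl⟩

def nodupFst (b : List (Int × Bool)) : Bool := decide ((b.map Prod.fst).Nodup)

-- every size-n combination from l whose fsts all lie in a list shorter than n fails the filter
lemma kill (l : List (Int × Bool)) (s : List Int) (n : Nat)
    (hsub : ∀ p ∈ l, p.1 ∈ s) (hn : s.length < n) :
    (pyCombinations n l).filter nodupFst = [] := by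
  rw [List.filter_eq_nil_iff]
  intro b hb
  obtain ⟨hsl, hlen⟩ := mem_pyCombinations l n b hb
  simp only [nodupFst, decide_eq_true_eq]
  intro hnd
  have hsubs : b.map Prod.fst ⊆ s := by
    intro a ha
    simp only [List.mem_map] at ha
    obtain ⟨p, hp, rfl⟩ := ha
    exact hsub p (hsl.subset hp)
  have := (hnd.subperm hsubs).length_le
  simp [hlen] at this
  omega

-- prepending a pair with key k kills nothing more once k itself is forbidden
lemma drop_key (k : Int) (p : Int × Bool) (hp : p.1 = k) (l : List (Int × Bool)) (m : Nat) :
    (pyCombinations m (p :: l)).filter (fun b => decide (k ∉ b.map Prod.fst ∧ (b.map Prod.fst).Nodup))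
      = (pyCombinations m l).filter (fun b => decide (k ∉ b.map Prod.fst ∧ (b.map Prod.fst).Nodup)) := by
  cases m with
  | zero => simp [pyCombinations]
  | succ m' =>
    simp only [pyCombinations, List.filter_append, List.filter_map]
    have : ((pyCombinations m' l).filter
        ((fun b => decide (k ∉ b.map Prod.fst ∧ (b.map Prod.fst).Nodup)) ∘ (fun b => p :: b))) = [] := by
      rw [List.filter_eq_nil_iff]
      intro b _
      simp [Function.comp, hp]
    rw [this]
    cases m' with
    | zero => simp
    | succ m'' => simp

lemma mem_pyProductTF (t : List Int) (p : Int × Bool) (hp : p ∈ pyProductTF t) : p.1 ∈ t := by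
  simp only [pyProductTF, List.mem_flatMap] at hp
  obtain ⟨k, hk, hpk⟩ := hp
  simp at hpk
  rcases hpk with rfl | rfl <;> simpa

lemma main_views (t : List Int) (ht : t.Nodup) :
    (pyCombinations t.length (pyProductTF t)).filter nodupFst
      = (boolTuples t.length).map (fun bits => t.zip bits) := by
  induction t with
  | nil => simp [pyProductTF, pyCombinations, boolTuples, nodupFst]
  | cons k t ih =>
    obtain ⟨hk, ht'⟩ := List.nodup_cons.mp ht
    have hR := ih ht'
    have hQP : ∀ b ∈ pyCombinations t.length (pyProductTF t),
        (decide (k ∉ b.map Prod.fst ∧ (b.map Prod.fst).Nodup)) = nodupFst b := by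
      intro b hb
      obtain ⟨hsl, _⟩ := mem_pyCombinations _ _ _ hb
      have hkb : k ∉ b.map Prod.fst := by
        intro hmem
        simp only [List.mem_map] at hmem
        obtain ⟨p, hp, hpk⟩ := hmem
        exact hk (hpk ▸ mem_pyProductTF t p (hsl.subset hp))
      simp [nodupFst, hkb]
    have hQ : ∀ (bb : Bool),
        ((pyCombinations t.length ((k, bb) :: pyProductTF t)).filter
          (fun b => decide (k ∉ b.map Prod.fst ∧ (b.map Prod.fst).Nodup)))
        = (boolTuples t.length).map (fun bits => t.zip bits) := by
      intro bb
      rw [drop_key k (k, bb) rfl]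
      rw [List.filter_congr hQP, hR]
    have hcons : ∀ (bb : Bool) (b : List (Int × Bool)),
        nodupFst ((k, bb) :: b) = decide (k ∉ b.map Prod.fst ∧ (b.map Prod.fst).Nodup) := by
      intro bb b
      simp [nodupFst, List.nodup_cons]
    have hprod : pyProductTF (k :: t) = (k, true) :: (k, false) :: pyProductTF t := by
      simp [pyProductTF]
    have hlen : (k :: t).length = t.length + 1 := by simp
    rw [hprod, hlen]
    show ((pyCombinations t.length ((k, false) :: pyProductTF t)).map (fun b => (k, true) :: b)
        ++ pyCombinations (t.length + 1) ((k, false) :: pyProductTF t)).filter nodupFst = _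
    rw [List.filter_append, List.filter_map]
    have h1 : ((pyCombinations t.length ((k, false) :: pyProductTF t)).filter
        (nodupFst ∘ (fun b => (k, true) :: b))).map (fun b => (k, true) :: b)
        = ((boolTuples t.length).map (fun bits => t.zip bits)).map (fun b => (k, true) :: b) := by
      congr 1
      rw [show (nodupFst ∘ (fun b => (k, true) :: b))
          = (fun b => decide (k ∉ b.map Prod.fst ∧ (b.map Prod.fst).Nodup)) from
        funext (fun b => hcons true b)]
      exact hQ false
    have h2 : (pyCombinations (t.length + 1) ((k, false) :: pyProductTF t)).filter nodupFst
        = ((boolTuples t.length).map (fun bits => t.zip bits)).map (fun b => (k, false) :: b) := by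
      show ((pyCombinations t.length (pyProductTF t)).map (fun b => (k, false) :: b)
          ++ pyCombinations (t.length + 1) (pyProductTF t)).filter nodupFst = _
      rw [List.filter_append, List.filter_map]
      have hkill : (pyCombinations (t.length + 1) (pyProductTF t)).filter nodupFst = [] := by
        exact kill _ t _ (mem_pyProductTF t) (by omega)
      rw [hkill]
      rw [show (nodupFst ∘ (fun b => (k, false) :: b))
          = (fun b => decide (k ∉ b.map Prod.fst ∧ (b.map Prod.fst).Nodup)) from
        funext (fun b => hcons false b)]
      rw [List.filter_congr hQP, hR]
      simp
    rw [h1, h2]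
    simp only [boolTuples, List.flatMap_cons, List.flatMap_nil, List.map_append,
      List.append_nil, List.map_map]
    congr 1

lemma foldl_append_map (f : List Int → List (List (Int × Bool)))
    (x : List (List Int)) : ∀ acc, x.foldl (fun u i => u ++ [f i]) acc = acc ++ x.map f := by
  induction x with
  | nil => simp
  | cons h t ih => intro acc; simp [ih]

lemma pred_eq (i : List Int) (b : List (Int × Bool)) (hlen : b.length = i.length) :
    ((PySem.Set.ofList (b.map Prod.fst)).length == i.length) = nodupFst b := by
  have hiff := setLen_eq_iff (b.map Prod.fst)
  have hlen' : (b.map Prod.fst).length = i.length := by simp [hlen]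
  by_cases h : (b.map Prod.fst).Nodup
  · simp [nodupFst, h, ← hlen', hiff.mpr h]
  · have hne : (PySem.Set.ofList (b.map Prod.fst)).length ≠ i.length := by
      rw [← hlen']; exact fun e => h (hiff.mp e)
    simp [nodupFst, h, hne]

lemma per_element (i : List Int) :
    (pyCombinations i.length (pyProductTF i)).filter
        (fun b => (PySem.Set.ofList (b.map Prod.fst)).length == i.length)
      = (if (PySem.Set.ofList i).length != i.length then []
         else (boolTuples i.length).map (fun bits => i.zip bits)) := by
  by_cases hnd : i.Nodup
  · have hset : (PySem.Set.ofList i).length = i.length := (setLen_eq_iff i).mpr hnd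
    rw [if_neg (by simp [hset])]
    rw [List.filter_congr (q := nodupFst) ?_]
    · exact main_views i hnd
    · intro b hb
      obtain ⟨_, hlen⟩ := mem_pyCombinations _ _ _ hb
      exact pred_eq i b hlen
  · have hset : (PySem.Set.ofList i).length ≠ i.length := fun h => hnd ((setLen_eq_iff i).mp h)
    rw [if_pos (by simpa using hset)]
    rw [List.filter_congr (q := nodupFst) ?_]
    · have hdl : (i.dedup).length < i.length := by
        have hsl := List.dedup_sublist i
        rcases Nat.lt_or_ge i.dedup.length i.length with h | h
        · exact h
        · exfalso
          have : i.dedup = i := hsl.eq_of_length (Nat.le_antisymm (hsl.length_le) h)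
          exact hnd (this ▸ i.nodup_dedup)
      exact kill _ i.dedup _ (fun p hp => List.mem_dedup.mpr (mem_pyProductTF i p hp)) hdl
    · intro b hb
      obtain ⟨_, hlen⟩ := mem_pyCombinations _ _ _ hb
      exact pred_eq i b hlen

-- ===== VERDICT (by name: the statement is the Claim_ definition above) =====
theorem get_unique_views_py_spec : Claim_equal_get_unique_views_py := by
  intro x _
  unfold Spec_get_unique_views_py get_unique_views_py get_unique_views_py_alt
  rw [foldl_append_map]
  simp only [List.nil_append]
  apply List.map_congr_left
  intro i _
  exact per_element i
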